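-- pv_equiv track=rewrite | github.com/Haiduongcable/DatasetProcessing | AddNose_CrownPose/check_annotation_crowpose.py | update_joint_kp
-- ===== SOURCE A (Python) =====
-- def update_joint_kp(join_keypoint_categories):
--     status_update = True
--     update_joint = []
--     for pair in join_keypoint_categories:
--         if 0 in pair:
--             status_update = False
--             break
--     if status_update:
--         for pair in join_keypoint_categories:
--             start_index, end_index = pair
--             update_joint.append((start_index - 1, end_index - 1))
--         return update_joint
--     return join_keypoint_categories
-- ===== SOURCE B (Python) =====
-- def update_joint_kp(join_keypoint_categories):
--     result = []
--     for pair in join_keypoint_categories: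
--         start_index, end_index = pair
--         if start_index == 0 or end_index == 0:
--             return join_keypoint_categories
--         result.append((start_index - 1, end_index - 1))
--     return result
-- ===== Notes on version B (the rewrite author's own statement) =====
-- stated objective: simpler
-- what changed: Replaces A's two separate loops (a scan-for-zero pass, then a decrement pass) by a single traversal that accumulates decremented pairs and returns the original list as soon as a zero is seen.
import Mathlib
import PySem

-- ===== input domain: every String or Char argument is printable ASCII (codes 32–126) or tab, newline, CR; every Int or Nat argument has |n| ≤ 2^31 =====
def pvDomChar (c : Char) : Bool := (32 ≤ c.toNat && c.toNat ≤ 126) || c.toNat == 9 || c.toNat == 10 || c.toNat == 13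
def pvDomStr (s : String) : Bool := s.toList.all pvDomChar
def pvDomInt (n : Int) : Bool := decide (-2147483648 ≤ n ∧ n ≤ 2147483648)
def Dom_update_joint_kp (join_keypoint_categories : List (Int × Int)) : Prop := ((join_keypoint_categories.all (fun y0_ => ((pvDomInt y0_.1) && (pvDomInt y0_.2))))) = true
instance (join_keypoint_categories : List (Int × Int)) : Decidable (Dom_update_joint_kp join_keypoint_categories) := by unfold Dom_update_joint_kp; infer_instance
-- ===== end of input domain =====

-- B merges A's scan-for-zero pass and decrement pass into one accumulating traversal (objective: simpler).


-- ===== PORT A =====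
-- A's first loop: scan the pairs, set status_update := false and break at the first pair containing 0.
def pvScanZero : List (Int × Int) → Bool
  | [] => true
  | p :: rest => if p.1 = 0 ∨ p.2 = 0 then false else pvScanZero rest

def update_joint_kp (join_keypoint_categories : List (Int × Int)) : List (Int × Int) :=
  let status_update := pvScanZero join_keypoint_categories
  if status_update then
    -- A's second loop: append (start-1, end-1) for every pair
    join_keypoint_categories.foldl (fun update_joint pair => update_joint ++ [(pair.1 - 1, pair.2 - 1)]) []
  else
    join_keypoint_categories

-- ===== PORT B =====
-- B: one pass; accumulate decremented pairs, return the original list at the first zero.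
def pvAltGo (orig : List (Int × Int)) : List (Int × Int) → List (Int × Int) → List (Int × Int)
  | result, [] => result
  | result, pair :: rest =>
    if pair.1 = 0 ∨ pair.2 = 0 then orig
    else pvAltGo orig (result ++ [(pair.1 - 1, pair.2 - 1)]) rest

def update_joint_kp_alt (join_keypoint_categories : List (Int × Int)) : List (Int × Int) :=
  pvAltGo join_keypoint_categories [] join_keypoint_categories

-- ===== PRECONDITION & SPEC =====
def Spec_update_joint_kp (join_keypoint_categories : List (Int × Int)) (out : List (Int × Int)) : Prop := out = update_joint_kp_alt join_keypoint_categories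
instance (join_keypoint_categories : List (Int × Int)) (out : List (Int × Int)) : Decidable (Spec_update_joint_kp join_keypoint_categories out) := by unfold Spec_update_joint_kp; infer_instance

-- ===== CLAIM (what is proved, stated in full; the proofs are below) =====
def Claim_equal_update_joint_kp : Prop := ∀ (join_keypoint_categories : List (Int × Int)), Dom_update_joint_kp join_keypoint_categories → Spec_update_joint_kp join_keypoint_categories (update_joint_kp join_keypoint_categories)

-- ===== LEMMAS AND PROOFS =====
lemma pvFoldl_split (l : List (Int × Int)) (init : List (Int × Int)) :
    l.foldl (fun r p => r ++ [(p.1 - 1, p.2 - 1)]) init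
      = init ++ l.foldl (fun r p => r ++ [(p.1 - 1, p.2 - 1)]) [] := by
  induction l generalizing init with
  | nil => simp
  | cons p rest ih =>
    simp only [List.foldl_cons, List.nil_append]
    rw [ih, ih [(p.1 - 1, p.2 - 1)]]
    simp

lemma pvAltGo_char (orig : List (Int × Int)) (l acc : List (Int × Int)) :
    pvAltGo orig acc l =
      if pvScanZero l then acc ++ l.foldl (fun r p => r ++ [(p.1 - 1, p.2 - 1)]) [] else orig := by
  induction l generalizing acc with
  | nil => simp [pvAltGo, pvScanZero]
  | cons p rest ih =>
    by_cases h : p.1 = 0 ∨ p.2 = 0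
    · simp [pvAltGo, pvScanZero, h]
    · rw [pvAltGo, pvScanZero, if_neg h, if_neg h, ih]
      by_cases hz : pvScanZero rest
      · rw [if_pos hz, if_pos hz]
        simp only [List.foldl_cons, List.nil_append]
        rw [pvFoldl_split]
        simp
      · rw [if_neg hz, if_neg hz]

-- ===== VERDICT (by name: the statement is the Claim_ definition above) =====
theorem update_joint_kp_spec : Claim_equal_update_joint_kp := by
  intro l _
  unfold Spec_update_joint_kp update_joint_kp update_joint_kp_alt
  rw [pvAltGo_char]
  simp
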